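-- pv_equiv track=rewrite | github.com/wilson-vghtpe-anes/nurse-schedule-line | main.py | format_ot_priority
-- ===== SOURCE A (Python) =====
-- def format_ot_priority(rows: list, all_users: dict) -> str:
--     if not rows:
--         return "（查無加班順位資料）"
--     lines = []
--     current_shift = None
--     for r in rows:
--         name = all_users.get(r["user_id"], {}).get("name", "?")
--         shift = r.get("shift_type") or "—"
--         if shift != current_shift:
--             lines.append(f"【{shift}】")
--             current_shift = shift
--         lines.append(f"  {r['priority_order']}. {name}")
--     return "\n".join(lines)
-- ===== SOURCE B (Python) =====
-- def format_ot_priority(rows: list, all_users: dict) -> str: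
--     if not rows:
--         return "（查無加班順位資料）"
--
--     def line(r):
--         name = all_users.get(r["user_id"], {}).get("name", "?")
--         return f"  {r['priority_order']}. {name}"
--
--     def key(r):
--         return r.get("shift_type") or "—"
--
--     out = []
--     i, n = 0, len(rows)
--     while i < n:
--         shift = key(rows[i])
--         j = i + 1
--         while j < n and key(rows[j]) == shift:
--             j += 1
--         out.append(f"【{shift}】")
--         out.extend(line(r) for r in rows[i:j])
--         i = j
--     return "\n".join(out)
-- ===== Notes on version B (the rewrite author's own statement) =====
-- stated objective: alternative
-- what changed: Replaces the sentinel-tracking single pass (current_shift state variable deciding per row whether to emit a header) by an explicit groupby-style decomposition: split rows into maximal runs of consecutive equal shift keys, emit one header per run followed by its member lines.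
import Mathlib
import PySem

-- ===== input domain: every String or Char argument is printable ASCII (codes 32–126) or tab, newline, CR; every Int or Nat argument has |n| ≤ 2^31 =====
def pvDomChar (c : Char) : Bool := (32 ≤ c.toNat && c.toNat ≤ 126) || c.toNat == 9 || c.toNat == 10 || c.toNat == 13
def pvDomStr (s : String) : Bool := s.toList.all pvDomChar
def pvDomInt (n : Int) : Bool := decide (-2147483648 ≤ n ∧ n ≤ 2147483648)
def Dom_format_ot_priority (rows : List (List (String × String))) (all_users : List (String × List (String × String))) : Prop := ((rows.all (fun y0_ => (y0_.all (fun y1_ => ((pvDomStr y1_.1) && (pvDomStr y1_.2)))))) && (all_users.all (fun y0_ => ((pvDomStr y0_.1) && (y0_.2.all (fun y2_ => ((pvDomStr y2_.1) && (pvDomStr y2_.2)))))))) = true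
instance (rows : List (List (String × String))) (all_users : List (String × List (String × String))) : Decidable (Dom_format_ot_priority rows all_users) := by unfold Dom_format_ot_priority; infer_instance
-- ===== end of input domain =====

-- B replaces A's sentinel-tracking single pass by an explicit groupby-style decomposition
-- into maximal runs of consecutive equal shift keys (objective: alternative; return value only).

-- ===== PORT A =====
-- one loop step of A: (accumulated lines, current_shift) updated by row r
def pvStepA (all_users : List (String × List (String × String))) (st : List String × Option String) (r : List (String × String)) : List String × Option String :=
  let name := PySem.Dict.getD (PySem.Dict.ofList (PySem.Dict.getD (PySem.Dict.ofList all_users) ((PySem.Dict.get? (PySem.Dict.ofList r) "user_id").getD "") [])) "name" "?"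
  let shift := match PySem.Dict.get? (PySem.Dict.ofList r) "shift_type" with
    | some s => if s = "" then "—" else s
    | none => "—"
  let line := "  " ++ (PySem.Dict.get? (PySem.Dict.ofList r) "priority_order").getD "" ++ ". " ++ name
  if some shift ≠ st.2 then (st.1 ++ ["【" ++ shift ++ "】"] ++ [line], some shift)
  else (st.1 ++ [line], st.2)

def format_ot_priority (rows : List (List (String × String))) (all_users : List (String × List (String × String))) : String :=
  if rows = [] then "（查無加班順位資料）"
  else PySem.Str.join "\n" (rows.foldl (pvStepA all_users) ([], none)).1

-- ===== PORT B =====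
-- key(r) = r.get("shift_type") or "—"
def pvKeyB (r : List (String × String)) : String :=
  match PySem.Dict.get? (PySem.Dict.ofList r) "shift_type" with
  | some s => if s = "" then "—" else s
  | none => "—"

-- line(r) = f"  {r['priority_order']}. {name}"
def pvLineB (all_users : List (String × List (String × String))) (r : List (String × String)) : String :=
  let name := PySem.Dict.getD (PySem.Dict.ofList (PySem.Dict.getD (PySem.Dict.ofList all_users) ((PySem.Dict.get? (PySem.Dict.ofList r) "user_id").getD "") [])) "name" "?"
  "  " ++ (PySem.Dict.get? (PySem.Dict.ofList r) "priority_order").getD "" ++ ". " ++ name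

-- the outer while loop: each iteration consumes one maximal run rows[i:j] of equal key
def pvGroupsB (all_users : List (String × List (String × String))) : List (List (String × String)) → List String
  | [] => []
  | r :: rest =>
    let shift := pvKeyB r
    ("【" ++ shift ++ "】") ::
      ((r :: rest.takeWhile (fun x => pvKeyB x = shift)).map (pvLineB all_users)
        ++ pvGroupsB all_users (rest.dropWhile (fun x => pvKeyB x = shift)))
termination_by l => l.length
decreasing_by
  exact Nat.lt_succ_of_le (List.length_dropWhile_le _ _)

def format_ot_priority_alt (rows : List (List (String × String))) (all_users : List (String × List (String × String))) : String :=
  if rows = [] then "（查無加班順位資料）"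
  else PySem.Str.join "\n" (pvGroupsB all_users rows)

-- ===== PRECONDITION & SPEC =====
-- Pre_ excludes exactly the rows missing a "user_id" or "priority_order" key, on which A raises KeyError.
def Pre_format_ot_priority (rows : List (List (String × String))) (all_users : List (String × List (String × String))) : Prop :=
  rows.all (fun r => ((PySem.Dict.get? (PySem.Dict.ofList r) "user_id").isSome && (PySem.Dict.get? (PySem.Dict.ofList r) "priority_order").isSome)) = true
instance (rows : List (List (String × String))) (all_users : List (String × List (String × String))) : Decidable (Pre_format_ot_priority rows all_users) := by unfold Pre_format_ot_priority; infer_instance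

def pvWitness_format_ot_priority : (List (List (String × String))) × (List (String × List (String × String))) :=
  ([[("user_id", "a"), ("priority_order", "1"), ("shift_type", "D")],
    [("user_id", "b"), ("priority_order", "2")]],
   [("a", [("name", "Alice")])])

def Spec_format_ot_priority (rows : List (List (String × String))) (all_users : List (String × List (String × String))) (out : String) : Prop := out = format_ot_priority_alt rows all_users
instance (rows : List (List (String × String))) (all_users : List (String × List (String × String))) (out : String) : Decidable (Spec_format_ot_priority rows all_users out) := by unfold Spec_format_ot_priority; infer_instance

-- ===== CLAIM (what is proved, stated in full; the proofs are below) =====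
def Claim_equal_format_ot_priority : Prop := ∀ (rows : List (List (String × String))) (all_users : List (String × List (String × String))), Dom_format_ot_priority rows all_users → Pre_format_ot_priority rows all_users → Spec_format_ot_priority rows all_users (format_ot_priority rows all_users)

-- ===== LEMMAS AND PROOFS =====

-- the lines A's loop emits from list l when current_shift = cur
def pvALines (all_users : List (String × List (String × String))) : Option String → List (List (String × String)) → List String
  | _, [] => []
  | cur, r :: rest =>
    let s := pvKeyB r
    (if some s ≠ cur then ["【" ++ s ++ "】"] else []) ++ [pvLineB all_users r]
      ++ pvALines all_users (some s) rest

theorem pvFoldA_eq (all_users : List (String × List (String × String)))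
    (l : List (List (String × String))) :
    ∀ (acc : List String) (cur : Option String),
      (l.foldl (pvStepA all_users) (acc, cur)).1 = acc ++ pvALines all_users cur l := by
  induction l with
  | nil => intro acc cur; simp [pvALines]
  | cons r rest ih =>
    intro acc cur
    simp only [List.foldl_cons, pvStepA, pvALines]
    by_cases h : some (pvKeyB r) ≠ cur
    · simp only [pvKeyB, pvLineB] at *
      rw [if_pos h, ih]
      simp [h]
    · simp only [pvKeyB, pvLineB] at *
      rw [if_neg h, ih]
      push Not at h
      simp [← h]

theorem pvALines_some (all_users : List (String × List (String × String)))
    (l : List (List (String × String))) :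
    ∀ (s : String),
      pvALines all_users (some s) l =
        (l.takeWhile (fun x => pvKeyB x = s)).map (pvLineB all_users)
          ++ pvGroupsB all_users (l.dropWhile (fun x => pvKeyB x = s)) := by
  induction l with
  | nil => intro s; simp [pvALines, pvGroupsB]
  | cons r rest ih =>
    intro s
    by_cases h : pvKeyB r = s
    · simp only [pvALines, List.takeWhile_cons, List.dropWhile_cons, h]
      simp [ih s]
    · have hne : some (pvKeyB r) ≠ some s := by simpa using h
      simp only [pvALines, List.takeWhile_cons, List.dropWhile_cons, h]
      simp only [decide_false, Bool.false_eq_true, if_false, List.map_nil, List.nil_append]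
      rw [pvGroupsB]
      simp [hne, ih (pvKeyB r)]

theorem pvALines_none (all_users : List (String × List (String × String)))
    (l : List (List (String × String))) :
    pvALines all_users none l = pvGroupsB all_users l := by
  cases l with
  | nil => simp [pvALines, pvGroupsB]
  | cons r rest =>
    rw [pvGroupsB]
    simp only [pvALines]
    simp [pvALines_some all_users rest (pvKeyB r)]

-- ===== VERDICT (by name: the statement is the Claim_ definition above) =====
theorem format_ot_priority_spec : Claim_equal_format_ot_priority := by
  intro rows all_users _ _
  unfold Spec_format_ot_priority format_ot_priority format_ot_priority_alt
  by_cases h : rows = []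
  · simp [h]
  · rw [if_neg h, if_neg h, pvFoldA_eq, pvALines_none]
    simp
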